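-- pv_equiv track=rewrite | github.com/michaelGoogle/folderReorg | src/shortcuts.py | _next_shortcut
-- ===== SOURCE A (Python) =====
-- def _next_shortcut(s: str) -> str:
--     """Lexicographic bump within A-Z, then extend length."""
--     letters = list(s)
--     i = len(letters) - 1
--     while i >= 0:
--         if letters[i] < "Z":
--             letters[i] = chr(ord(letters[i]) + 1)
--             return "".join(letters)
--         letters[i] = "A"
--         i -= 1
--     return "A" + "".join(letters)  # extend length
-- ===== SOURCE B (Python) =====
-- def _next_shortcut(s: str) -> str:
--     """Left-to-right prefix recurrence: next(p+c) = p + succ(c) if c < 'Z' else next(p) + 'A'."""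
--     res = "A"  # next("") == "A"
--     for i, c in enumerate(s):
--         res = s[:i] + chr(ord(c) + 1) if c < "Z" else res + "A"
--     return res
-- ===== Notes on version B (the rewrite author's own statement) =====
-- stated objective: alternative
-- what changed: Replaces A's right-to-left mutate-the-char-list carry loop with early return by a left-to-right single pass that maintains the answer for every prefix via the recurrence next(p+c) = p + succ(c) if c < 'Z' else next(p) + 'A', starting from next('') = 'A'.
import Mathlib
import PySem

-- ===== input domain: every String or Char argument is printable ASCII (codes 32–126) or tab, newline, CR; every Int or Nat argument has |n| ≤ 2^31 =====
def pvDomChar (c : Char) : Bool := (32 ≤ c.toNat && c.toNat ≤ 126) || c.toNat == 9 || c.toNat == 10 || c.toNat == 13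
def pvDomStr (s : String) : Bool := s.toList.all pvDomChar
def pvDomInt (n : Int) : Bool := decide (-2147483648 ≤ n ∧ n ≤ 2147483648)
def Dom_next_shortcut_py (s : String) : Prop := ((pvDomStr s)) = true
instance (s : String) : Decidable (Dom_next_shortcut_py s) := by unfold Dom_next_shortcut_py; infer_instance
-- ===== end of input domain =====

-- B replaces A's right-to-left carry loop by a left-to-right pass maintaining the answer
-- for each prefix via next(p+c) = p + succ(c) if c < 'Z' else next(p) + 'A' (objective: alternative).

-- ===== PORT A =====
-- A's while loop, index i counting down; cells right of i have already been overwritten with 'A'.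
def nextShortcutLoopA (letters : List Char) (i : Nat) : String :=
  let c := letters.getD i ' '
  if c < 'Z' then String.ofList (letters.set i (Char.ofNat (c.toNat + 1)))
  else
    let l2 := letters.set i 'A'
    if h : i = 0 then "A" ++ String.ofList l2
    else nextShortcutLoopA l2 (i - 1)
termination_by i

def next_shortcut_py (s : String) : String :=
  let letters := s.toList
  if letters.length = 0 then "A" ++ String.ofList letters
  else nextShortcutLoopA letters (letters.length - 1)

-- ===== PORT B =====
-- Source B's loop body: res = s[:i] + chr(ord(c)+1) if c < "Z" else res + "A"
def stepB (full : List Char) (res : List Char) (ic : Int × Char) : List Char :=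
  if ic.2 < 'Z' then PySem.List.slice full none (some ic.1) ++ [Char.ofNat (ic.2.toNat + 1)]
  else res ++ ['A']

def next_shortcut_py_alt (s : String) : String :=
  let l := s.toList
  String.ofList ((PySem.List.enumerate l).foldl (stepB l) ['A'])

-- ===== PRECONDITION & SPEC =====
def Spec_next_shortcut_py (s : String) (out : String) : Prop := out = next_shortcut_py_alt s
instance (s : String) (out : String) : Decidable (Spec_next_shortcut_py s out) := by unfold Spec_next_shortcut_py; infer_instance

-- ===== CLAIM (what is proved, stated in full; the proofs are below) =====
def Claim_equal_next_shortcut_py : Prop := ∀ (s : String), Dom_next_shortcut_py s → Spec_next_shortcut_py s (next_shortcut_py s)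

-- ===== LEMMAS AND PROOFS =====

-- proof-side characterisation: the rightmost index with a char below 'Z'
def pivotB : List Char → Option Nat
  | [] => none
  | c :: rest =>
    match pivotB rest with
    | some j => some (j + 1)
    | none => if c < 'Z' then some 0 else none

theorem string_append_ofList (l : List Char) :
    "A" ++ String.ofList l = String.ofList ('A' :: l) := by
  rw [show "A" = String.ofList ['A'] by decide, ← String.ofList_append]; rfl

theorem pivotB_append_singleton (xs : List Char) (c : Char) :
    pivotB (xs ++ [c]) = if c < 'Z' then some xs.length else pivotB xs := by
  induction xs with
  | nil => simp [pivotB]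
  | cons x xs ih =>
      simp only [List.cons_append, pivotB, ih]
      split_ifs <;> rcases h : pivotB xs with _ | j <;> simp

theorem pivotB_lt_length (xs : List Char) (j : Nat) (h : pivotB xs = some j) :
    j < xs.length := by
  induction xs generalizing j with
  | nil => simp [pivotB] at h
  | cons x xs ih =>
      simp only [pivotB] at h
      rcases h' : pivotB xs with _ | k <;> rw [h'] at h
      · split_ifs at h <;> simp_all <;> omega
      · simp at h; subst h; exact Nat.succ_lt_succ (ih k h')

-- A-side invariant: A's loop on (pre ++ 'A'^m) at index (pre.length - 1)
theorem loopA_spec (pre : List Char) (m : Nat) (hne : pre ≠ []) :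
    nextShortcutLoopA (pre ++ List.replicate m 'A') (pre.length - 1) =
      match pivotB pre with
      | none => "A" ++ String.ofList (List.replicate (pre.length + m) 'A')
      | some j =>
          String.ofList (pre.take j ++ [Char.ofNat ((pre.getD j ' ').toNat + 1)]
                     ++ List.replicate (pre.length - j - 1 + m) 'A') := by
  induction pre using List.reverseRecOn generalizing m with
  | nil => exact absurd rfl hne
  | append_singleton xs c ih =>
      rw [nextShortcutLoopA]
      have hlen : (xs ++ [c]).length - 1 = xs.length := by simp
      have hget : ((xs ++ [c]) ++ List.replicate m 'A').getD xs.length ' ' = c := by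
        simp [List.getD]
      rw [hlen, hget, pivotB_append_singleton]
      by_cases hc : c < 'Z'
      · simp only [if_pos hc]
        have hset : ((xs ++ [c]) ++ List.replicate m 'A').set xs.length (Char.ofNat (c.toNat + 1))
            = xs ++ [Char.ofNat (c.toNat + 1)] ++ List.replicate m 'A' := by
          rw [List.append_assoc, List.set_append_right _ _ (Nat.le_refl xs.length)]
          simp
        rw [hset]
        simp [List.getD]
      · simp only [if_neg hc]
        have hset : ((xs ++ [c]) ++ List.replicate m 'A').set xs.length 'A'
            = xs ++ List.replicate (m + 1) 'A' := by
          rw [List.append_assoc, List.set_append_right _ _ (Nat.le_refl xs.length)]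
          simp [List.replicate_succ]
        rw [hset]
        rcases Decidable.em (xs = []) with hxs | hxs
        · subst hxs
          simp only [List.length_nil, dif_pos, pivotB]
          rw [string_append_ofList]
          simp only [List.nil_append, List.length_cons, List.length_nil]
          rw [Nat.add_comm m 1, string_append_ofList]
        · have hx0 : xs.length ≠ 0 := by simpa [List.length_eq_zero_iff] using hxs
          rw [dif_neg hx0]
          rw [ih (m + 1) hxs]
          rcases hp : pivotB xs with _ | j
          · simp only []
            have : xs.length + (m + 1) = (xs ++ [c]).length + m := by simp; omega
            rw [this]
          · have hj := pivotB_lt_length xs j hp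
            simp only []
            have h1 : (xs ++ [c]).take j = xs.take j := by
              rw [List.take_append_of_le_length (by omega)]
            have h2 : (xs ++ [c]).getD j ' ' = xs.getD j ' ' := by
              simp [List.getD, List.getElem?_append_left hj]
            have h3 : xs.length - j - 1 + (m + 1) = (xs ++ [c]).length - j - 1 + m := by
              simp; omega
            rw [h1, h2, h3]

-- B-side invariant: the left-to-right fold computes the pivot formula for every prefix xs of full
theorem foldB_spec (full : List Char) (xs : List Char) (h : xs.IsPrefix full) :
    (PySem.List.enumerate xs).foldl (stepB full) ['A'] =
      match pivotB xs with
      | none => List.replicate (xs.length + 1) 'A'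
      | some j => full.take j ++ [Char.ofNat ((xs.getD j ' ').toNat + 1)]
                    ++ List.replicate (xs.length - j - 1) 'A' := by
  induction xs using List.reverseRecOn with
  | nil => simp [PySem.List.enumerate, pivotB]
  | append_singleton ys c ih =>
      have hys : ys.IsPrefix full := (List.prefix_append ys [c]).trans h
      rw [PySem.List.enumerate_append, List.foldl_append, ih hys, pivotB_append_singleton]
      have henum : PySem.List.enumerate [c] (0 + ys.length) = [((ys.length : Int), c)] := by
        simp [PySem.List.enumerate_cons, PySem.List.enumerate_nil]
      rw [henum]
      simp only [List.foldl_cons, List.foldl_nil, stepB]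
      by_cases hc : c < 'Z'
      · simp only [if_pos hc]
        have hsl : PySem.List.slice full none (some (ys.length : Int)) = full.take ys.length :=
          PySem.List.slice_to_natCast full ys.length
        rw [hsl]
        have hget : (ys ++ [c]).getD ys.length ' ' = c := by simp [List.getD]
        rw [hget]
        have : (ys ++ [c]).length - ys.length - 1 = 0 := by simp
        rw [this]
        simp
      · simp only [if_neg hc]
        rcases hp : pivotB ys with _ | j
        · simp only []
          rw [← List.replicate_succ' ]
          have : (ys ++ [c]).length + 1 = ys.length + 1 + 1 := by simp
          rw [this]
        · have hj := pivotB_lt_length ys j hp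
          simp only []
          have hget : (ys ++ [c]).getD j ' ' = ys.getD j ' ' := by
            simp [List.getD, List.getElem?_append_left hj]
          have hrep : List.replicate (ys.length - j - 1) 'A' ++ ['A']
              = List.replicate ((ys ++ [c]).length - j - 1) 'A' := by
            rw [← List.replicate_succ']
            congr 1
            simp
            omega
          rw [hget, List.append_assoc, List.append_assoc, List.append_assoc, hrep]

-- ===== VERDICT (by name: the statement is the Claim_ definition above) =====
theorem next_shortcut_py_spec : Claim_equal_next_shortcut_py := by
  intro s _
  unfold Spec_next_shortcut_py next_shortcut_py next_shortcut_py_alt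
  dsimp only
  rw [foldB_spec s.toList s.toList (List.prefix_refl _)]
  rcases Decidable.em (s.toList = []) with h | h
  · simp [h, pivotB, List.replicate_succ]
  · have hlen : s.toList.length ≠ 0 := by simpa [List.length_eq_zero_iff] using h
    simp only [if_neg hlen]
    have hmain := loopA_spec s.toList 0 h
    simp only [List.replicate_zero, List.append_nil, Nat.add_zero] at hmain
    rw [hmain]
    rcases hp : pivotB s.toList with _ | j
    · simp only []
      rw [string_append_ofList, ← List.replicate_succ]
    · rfl
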